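-- pv_equiv track=rewrite | github.com/Xaylost/Repo1 | Time.py | max_recu
-- ===== SOURCE A (Python) =====
-- def max_recu(p, n):
--     if n == 1:
--         return p[0]
--     else:
--         max_rest = max_recu( p,  n-1)
--         if max_rest > p[n-1]:
--             return max_rest
--         else:
--             return p[n-1]
-- ===== SOURCE B (Python) =====
-- def max_recu(p, n):
--     m = p[0]
--     for i in range(1, n):
--         if p[i] > m:
--             m = p[i]
--     return m
-- ===== Notes on version B (the rewrite author's own statement) =====
-- stated objective: simpler
-- what changed: Replaces the n-deep recursion (which overflows Python's stack for large n) with a single iterative scan keeping a running maximum.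
import Mathlib
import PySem

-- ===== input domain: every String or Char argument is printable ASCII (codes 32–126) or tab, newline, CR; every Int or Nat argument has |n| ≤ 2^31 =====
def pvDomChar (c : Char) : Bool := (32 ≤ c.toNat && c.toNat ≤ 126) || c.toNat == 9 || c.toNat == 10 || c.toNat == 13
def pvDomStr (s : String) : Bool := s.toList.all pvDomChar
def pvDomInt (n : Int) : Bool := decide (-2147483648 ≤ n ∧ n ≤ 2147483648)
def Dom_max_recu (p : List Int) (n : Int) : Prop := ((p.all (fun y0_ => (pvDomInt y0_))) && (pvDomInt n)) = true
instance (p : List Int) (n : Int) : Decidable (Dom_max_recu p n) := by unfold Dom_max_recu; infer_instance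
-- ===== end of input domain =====

-- B replaces A's n-deep recursion with an iterative running-maximum scan (same values, O(1) space).

-- ===== PORT A =====
-- A recurses on n; ported as structural recursion on n.toNat. For n ≤ 0 Python
-- recurses without bound (RecursionError) — outside Pre_; the port returns 0 there.
def max_recuAux (p : List Int) : Nat → Int
  | 0 => 0
  | Nat.succ k =>
      if k = 0 then PySem.List.pyGetD p 0 0          -- n == 1: return p[0]
      else
        let max_rest := max_recuAux p k               -- max_recu(p, n-1)
        let x := PySem.List.pyGetD p (k : Int) 0      -- p[n-1]
        if max_rest > x then max_rest else x

def max_recu (p : List Int) (n : Int) : Int := max_recuAux p n.toNat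

-- ===== PORT B =====
def max_recu_alt (p : List Int) (n : Int) : Int :=
  (PySem.List.pyRange 1 n 1).foldl
    (fun m i => let x := PySem.List.pyGetD p i 0; if x > m then x else m)
    (PySem.List.pyGetD p 0 0)

-- ===== PRECONDITION & SPEC =====
-- Pre_ admits exactly the inputs on which Python A returns: 1 ≤ n (A raises
-- RecursionError for n ≤ 0) and n ≤ len(p) (IndexError at p[n-1] otherwise).
def Pre_max_recu (p : List Int) (n : Int) : Prop := 1 ≤ n ∧ n ≤ (p.length : Int)
instance (p : List Int) (n : Int) : Decidable (Pre_max_recu p n) := by unfold Pre_max_recu; infer_instance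
def pvWitness_max_recu : List Int × Int := ([4, -2, 7], 3)

def Spec_max_recu (p : List Int) (n : Int) (out : Int) : Prop := out = max_recu_alt p n
instance (p : List Int) (n : Int) (out : Int) : Decidable (Spec_max_recu p n out) := by unfold Spec_max_recu; infer_instance

-- ===== CLAIM (what is proved, stated in full; the proofs are below) =====
def Claim_equal_max_recu : Prop := ∀ (p : List Int) (n : Int), Dom_max_recu p n → Pre_max_recu p n → Spec_max_recu p n (max_recu p n)

-- ===== LEMMAS AND PROOFS =====

lemma max_recuAux_eq_foldl (p : List Int) (k : Nat) (h1 : 1 ≤ k) :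
    max_recuAux p k =
      (PySem.List.pyRange 1 (k : Int) 1).foldl
        (fun m i => let x := PySem.List.pyGetD p i 0; if x > m then x else m)
        (PySem.List.pyGetD p 0 0) := by
  induction k with
  | zero => omega
  | succ k ih =>
    by_cases hk : k = 0
    · subst hk
      simp [max_recuAux, PySem.List.pyRange_one_eq_nil (by norm_num : (1:Int) ≤ 1)]
    · have hk1 : 1 ≤ k := Nat.one_le_iff_ne_zero.mpr hk
      have hsplit : PySem.List.pyRange 1 ((k : Int) + 1) 1 =
          PySem.List.pyRange 1 (k : Int) 1 ++ [(k : Int)] :=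
        PySem.List.pyRange_one_succ_right (by exact_mod_cast hk1)
      have : ((Nat.succ k : Nat) : Int) = (k : Int) + 1 := by push_cast; ring
      rw [max_recuAux, if_neg hk, this, hsplit, List.foldl_append, ← ih hk1]
      simp only [List.foldl]
      split_ifs <;> omega

theorem max_recu_spec : Claim_equal_max_recu := by
  intro p n _ hpre
  obtain ⟨h1, h2⟩ := hpre
  unfold Spec_max_recu max_recu max_recu_alt
  rw [max_recuAux_eq_foldl p n.toNat (by omega), Int.toNat_of_nonneg (by omega)]
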